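-- pv_equiv track=rewrite | github.com/Radega1993/pathly | generator/level_generator.py | validate_level
-- ===== SOURCE A (Python) =====
-- from typing import Dict, List, Tuple
--
-- def validate_level(board: List[List[int]], solution: List[List[int]]) -> bool:
--     """Validar que un nivel sea correcto"""
--     size = len(board)
--
--     # Verificar que la solución use todas las celdas
--     solution_cells = sum(sum(row) for row in solution)
--     if solution_cells != size * size:
--         return False
--
--     # Verificar que el camino sea continuo
--     path_positions = []
--     for row in range(size):
--         for col in range(size):
--             if solution[row][col] == 1:
--                 path_positions.append((row, col))
--
--     # Verificar que los números estén en orden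
--     path_positions.sort(key=lambda pos: board[pos[0]][pos[1]])
--     for i, (row, col) in enumerate(path_positions):
--         if board[row][col] != i + 1:
--             return False
--
--     return True
-- ===== SOURCE B (Python) =====
-- def validate_level(board, solution):
--     """Validar que un nivel sea correcto"""
--     size = len(board)
--     if sum(sum(row) for row in solution) != size * size:
--         return False
--     vals = [board[r][c] for r in range(size) for c in range(size) if solution[r][c] == 1]
--     count = len(vals)
--     seen = [False] * (count + 1)
--     for v in vals:
--         if v < 1 or v > count or seen[v]:
--             return False
--         seen[v] = True
--     return True
-- ===== Notes on version B (the rewrite author's own statement) =====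
-- stated objective: alternative
-- what changed: A sorts the marked positions by board value and scans the sorted list checking value i+1 at slot i; B drops the sort and verifies the marked values are exactly 1..count with a single pass over a boolean seen-table.
import Mathlib
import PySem

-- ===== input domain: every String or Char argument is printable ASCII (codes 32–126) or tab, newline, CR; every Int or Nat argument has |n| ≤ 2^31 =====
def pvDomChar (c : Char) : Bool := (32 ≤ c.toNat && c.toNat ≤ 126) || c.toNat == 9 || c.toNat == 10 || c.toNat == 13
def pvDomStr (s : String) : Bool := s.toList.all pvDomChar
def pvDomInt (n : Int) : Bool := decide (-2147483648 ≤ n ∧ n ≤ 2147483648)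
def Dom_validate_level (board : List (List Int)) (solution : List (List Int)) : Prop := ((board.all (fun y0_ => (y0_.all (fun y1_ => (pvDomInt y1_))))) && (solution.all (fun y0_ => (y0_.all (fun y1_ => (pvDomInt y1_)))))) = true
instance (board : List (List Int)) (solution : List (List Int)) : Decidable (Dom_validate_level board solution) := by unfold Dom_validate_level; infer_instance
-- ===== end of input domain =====

-- B replaces A's sort-then-scan order check by a single counting-table pass over the
-- marked cells' values (objective: alternative algorithm).

-- ===== PORT A =====
-- board[p[0]][p[1]] (A's sort key; defaults unreachable under Pre_)
def vlKey (board : List (List Int)) (p : Int × Int) : Int :=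
  PySem.List.pyGetD (PySem.List.pyGetD board p.1 []) p.2 0

-- A's final 'for i, (row, col) in enumerate(path_positions)' loop
def vlCheckOrder (board : List (List Int)) : List (Int × (Int × Int)) → Bool
  | [] => true
  | (i, p) :: rest =>
      if vlKey board p ≠ i + 1 then false else vlCheckOrder board rest

def validate_level (board : List (List Int)) (solution : List (List Int)) : Bool :=
  let size : Int := board.length
  let solution_cells : Int := (solution.map (fun row => row.sum)).sum
  if solution_cells ≠ size * size then false
  else
    let path_positions : List (Int × Int) :=
      (PySem.List.pyRange 0 size 1).foldl (fun acc r =>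
        (PySem.List.pyRange 0 size 1).foldl (fun acc2 c =>
          if PySem.List.pyGetD (PySem.List.pyGetD solution r []) c 0 = 1
          then acc2 ++ [(r, c)] else acc2) acc) []
    let sortedPos := PySem.List.sorted path_positions (vlKey board) false
    vlCheckOrder board (PySem.List.enumerate sortedPos 0)

-- ===== PORT B =====
-- board[r][c] / solution[r][c] for B (defaults unreachable under Pre_)
def vbCell (m : List (List Int)) (r c : Int) : Int :=
  PySem.List.pyGetD (PySem.List.pyGetD m r []) c 0

-- B's 'for v in vals' loop over the seen table
def vbSeenLoop (count : Int) : List Int → List Bool → Bool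
  | [], _ => true
  | v :: rest, seen =>
      if v < 1 || count < v || seen.getD v.toNat false then false
      else vbSeenLoop count rest (seen.set v.toNat true)

def validate_level_alt (board : List (List Int)) (solution : List (List Int)) : Bool :=
  let size : Int := board.length
  if (solution.map (fun row => row.sum)).sum ≠ size * size then false
  else
    let vals : List Int :=
      (PySem.List.pyRange 0 size 1).flatMap (fun r =>
        ((PySem.List.pyRange 0 size 1).filter (fun c => vbCell solution r c = 1)).map
          (fun c => vbCell board r c))
    let count : Int := vals.length
    vbSeenLoop count vals (List.replicate (vals.length + 1) false)

-- ===== PRECONDITION & SPEC =====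
-- Pre_ excludes exactly the inputs where the Python raises IndexError: the cell-sum check
-- passes but 'solution' has fewer than size rows / a short row among the first size, or a
-- marked cell lies beyond its board row's length (A and B raise on the same inputs).
def Pre_validate_level (board : List (List Int)) (solution : List (List Int)) : Prop :=
  (solution.map (fun row => row.sum)).sum = (board.length : Int) * board.length →
    (board.length ≤ solution.length ∧
     ∀ r ∈ List.range board.length,
       board.length ≤ (solution.getD r []).length ∧
       ∀ c ∈ List.range board.length,
         (solution.getD r []).getD c 0 = 1 → c < (board.getD r []).length)
instance (board : List (List Int)) (solution : List (List Int)) : Decidable (Pre_validate_level board solution) := by unfold Pre_validate_level; infer_instance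

def pvWitness_validate_level : List (List Int) × List (List Int) := ([[1]], [[1]])

def Spec_validate_level (board : List (List Int)) (solution : List (List Int)) (out : Bool) : Prop := out = validate_level_alt board solution
instance (board : List (List Int)) (solution : List (List Int)) (out : Bool) : Decidable (Spec_validate_level board solution out) := by unfold Spec_validate_level; infer_instance

-- ===== CLAIM (what is proved, stated in full; the proofs are below) =====
def Claim_equal_validate_level : Prop := ∀ (board : List (List Int)) (solution : List (List Int)), Dom_validate_level board solution → Pre_validate_level board solution → Spec_validate_level board solution (validate_level board solution)

-- ===== LEMMAS AND PROOFS =====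

-- A's enumerate loop succeeds iff every element's key is its (start+1)-based position.
theorem vlCheckOrder_iff (board : List (List Int)) (l : List (Int × Int)) (s : Int) :
    vlCheckOrder board (PySem.List.enumerate l s) = true ↔
      ∀ (k : Nat) (h : k < l.length), vlKey board l[k] = s + k + 1 := by
  induction l generalizing s with
  | nil => simp [PySem.List.enumerate_nil, vlCheckOrder]
  | cons p t ih =>
      rw [PySem.List.enumerate_cons]
      simp only [vlCheckOrder]
      split_ifs with h
      · constructor
        · intro hf; cases hf
        · intro hall; exact h (by simpa using hall 0 (Nat.succ_pos _))
      · rw [not_not] at h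
        rw [ih]
        constructor
        · intro hall k hk
          cases k with
          | zero => simpa using h
          | succ m =>
              have hm : m < t.length := by simpa using Nat.lt_of_succ_lt_succ hk
              rw [List.getElem_cons_succ, hall m hm]
              push_cast; ring
        · intro hall k hk
          have := hall (k + 1) (by simpa using Nat.succ_lt_succ hk)
          rw [List.getElem_cons_succ] at this
          rw [this]; push_cast; ring

-- B's seen-table loop succeeds iff the values are distinct, in range, and unflagged.
theorem vbSeenLoop_iff (n : Int) (l : List Int) (seen : List Bool)
    (hlen : n.toNat + 1 ≤ seen.length) :
    vbSeenLoop n l seen = true ↔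
      l.Nodup ∧ ∀ v ∈ l, 1 ≤ v ∧ v ≤ n ∧ seen.getD v.toNat false = false := by
  induction l generalizing seen with
  | nil => simp [vbSeenLoop]
  | cons v t ih =>
      simp only [vbSeenLoop]
      split_ifs with h
      · simp only [false_iff]
        rintro ⟨-, hall⟩
        obtain ⟨h1, h2, h3⟩ := hall v (List.mem_cons_self ..)
        simp only [Bool.or_eq_true, decide_eq_true_eq] at h
        rcases h with (h | h) | h
        · omega
        · omega
        · rw [h3] at h; cases h
      · simp only [Bool.or_eq_true, decide_eq_true_eq, not_or, Bool.not_eq_true] at h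
        obtain ⟨⟨h1, h2⟩, h3⟩ := h
        have h1' : (1 : Int) ≤ v := by omega
        have h2' : v ≤ n := by omega
        have hvn : v.toNat < seen.length := by omega
        rw [ih (seen.set v.toNat true) (by simpa using hlen)]
        have hset : ∀ w : Int, 1 ≤ w →
            ((seen.set v.toNat true).getD w.toNat false = false ↔
              (w ≠ v ∧ seen.getD w.toNat false = false)) := by
          intro w hw
          by_cases hwv : w = v
          · subst hwv
            simp [List.getD_eq_getElem?_getD, List.getElem?_set_self hvn]
          · have hne : v.toNat ≠ w.toNat := by omega
            simp [List.getD_eq_getElem?_getD, List.getElem?_set_ne hne, hwv]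
        simp only [List.nodup_cons, List.forall_mem_cons]
        constructor
        · rintro ⟨hnd, hall⟩
          refine ⟨⟨?_, hnd⟩, ⟨h1', h2', h3⟩, ?_⟩
          · intro hmem
            exact ((hset v h1').mp (hall v hmem).2.2).1 rfl
          · intro w hw
            obtain ⟨a, b, c⟩ := hall w hw
            exact ⟨a, b, ((hset w a).mp c).2⟩
        · rintro ⟨⟨hvt, hnd⟩, -, hall⟩
          refine ⟨hnd, fun w hw => ?_⟩
          obtain ⟨a, b, c⟩ := hall w hw
          exact ⟨a, b, (hset w a).mpr ⟨fun e => hvt (e ▸ hw), c⟩⟩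

-- the target sequence [1, 2, …, n]
def vTarget (n : Nat) : List Int := (List.range n).map (fun k : Nat => ((k : Int) + 1))

theorem vTarget_length (n : Nat) : (vTarget n).length = n := by simp [vTarget]

theorem vTarget_nodup (n : Nat) : (vTarget n).Nodup := by
  refine List.Nodup.map (fun a b hab => ?_) List.nodup_range
  omega

theorem vTarget_mem (n : Nat) (v : Int) : v ∈ vTarget n ↔ 1 ≤ v ∧ v ≤ (n : Int) := by
  simp only [vTarget, List.mem_map, List.mem_range]
  constructor
  · rintro ⟨k, hk, rfl⟩; omega
  · rintro ⟨h1, h2⟩; exact ⟨(v - 1).toNat, by omega, by omega⟩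

theorem vTarget_pairwise (n : Nat) : (vTarget n).Pairwise (· ≤ ·) := by
  rw [vTarget, List.pairwise_map]
  exact List.Pairwise.imp (fun h => by omega) (List.pairwise_lt_range)

theorem vTarget_getElem (n k : Nat) (h : k < (vTarget n).length) :
    (vTarget n)[k] = (k : Int) + 1 := by
  simp [vTarget]

-- a list of ints is a permutation of [1..len] iff it is duplicate-free and in range
theorem perm_range_iff (vals : List Int) :
    vals.Perm (vTarget vals.length) ↔
      vals.Nodup ∧ ∀ v ∈ vals, 1 ≤ v ∧ v ≤ (vals.length : Int) := by
  constructor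
  · intro hp
    refine ⟨hp.nodup_iff.mpr (vTarget_nodup _), fun v hv => ?_⟩
    exact (vTarget_mem _ v).mp (hp.mem_iff.mp hv)
  · rintro ⟨hnd, hbd⟩
    have hsub : vals ⊆ vTarget vals.length := fun v hv => (vTarget_mem _ v).mpr (hbd v hv)
    exact (List.subperm_of_subset hnd hsub).perm_of_length_le (by simp [vTarget_length])

-- A's sorted order check holds iff the marked values are a permutation of [1..len]
theorem sorted_check_iff (board : List (List Int)) (l : List (Int × Int)) :
    vlCheckOrder board
        (PySem.List.enumerate (PySem.List.sorted l (vlKey board) false) 0) = true ↔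
      (l.map (vlKey board)).Perm (vTarget l.length) := by
  set L := PySem.List.sorted l (vlKey board) false with hL
  have hperm : L.Perm l := PySem.List.sorted_perm ..
  have hlen : L.length = l.length := hperm.length_eq
  rw [vlCheckOrder_iff]
  have step1 : (∀ (k : Nat) (h : k < L.length), vlKey board L[k] = 0 + k + 1) ↔
      L.map (vlKey board) = vTarget l.length := by
    constructor
    · intro hall
      apply List.ext_getElem (by simp [vTarget_length, hlen])
      intro k hk1 hk2
      rw [vTarget_getElem _ _ hk2, List.getElem_map]
      have := hall k (by simpa using hk1)
      rw [this]; ring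
    · intro he k hk
      have hk1 : k < (L.map (vlKey board)).length := by simpa using hk
      have hk2 : k < (vTarget l.length).length := by simp [vTarget_length, ← hlen, hk]
      have : (L.map (vlKey board))[k]'hk1 = (vTarget l.length)[k]'hk2 := by
        simp only [he]
      rw [List.getElem_map, vTarget_getElem _ _ hk2] at this
      rw [this]; ring
  rw [step1]
  constructor
  · intro he
    exact ((hperm.map (vlKey board)).symm.trans (he ▸ List.Perm.refl _))
  · intro hp
    have hpL : (L.map (vlKey board)).Perm (vTarget l.length) :=
      (hperm.map (vlKey board)).trans hp
    refine PySem.List.eq_of_perm_of_pairwise_le_of_injective (fun x => x)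
      (fun a b h => h) hpL ?_ ?_
    · simpa using PySem.List.sorted_map_key_pairwise (xs := l) (key := vlKey board)
    · simpa using vTarget_pairwise l.length

-- the two final loops agree on the same list of marked values
theorem checks_eq (board : List (List Int)) (l : List (Int × Int)) :
    vlCheckOrder board
        (PySem.List.enumerate (PySem.List.sorted l (vlKey board) false) 0) =
      vbSeenLoop ((l.map (vlKey board)).length : Int) (l.map (vlKey board))
        (List.replicate ((l.map (vlKey board)).length + 1) false) := by
  rw [Bool.eq_iff_iff, sorted_check_iff,
    vbSeenLoop_iff _ _ _ (by simp)]
  have hv : (l.map (vlKey board)).length = l.length := List.length_map ..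
  rw [← hv, perm_range_iff]
  have hrep : ∀ v : Int, (List.replicate ((l.map (vlKey board)).length + 1) false).getD
      v.toNat false = false := by
    intro v
    simp only [List.getD_eq_getElem?_getD, List.getElem?_replicate]
    split <;> rfl
  constructor
  · rintro ⟨hnd, hbd⟩
    exact ⟨hnd, fun v hvm => ⟨(hbd v hvm).1, (hbd v hvm).2, hrep v⟩⟩
  · rintro ⟨hnd, hbd⟩
    exact ⟨hnd, fun v hvm => ⟨(hbd v hvm).1, (hbd v hvm).2.1⟩⟩

-- ===== VERDICT (by name: the statement is the Claim_ definition above) =====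
theorem validate_level_spec : Claim_equal_validate_level := by
  intro board solution _ _
  unfold Spec_validate_level validate_level validate_level_alt
  by_cases hc : (solution.map (fun row => row.sum)).sum ≠ ((board.length : Int)) * board.length
  · rw [if_pos hc, if_pos hc]
  · rw [if_neg hc, if_neg hc]
    have hps : (PySem.List.pyRange 0 (board.length : Int) 1).foldl (fun acc r =>
        (PySem.List.pyRange 0 (board.length : Int) 1).foldl (fun acc2 c =>
          if PySem.List.pyGetD (PySem.List.pyGetD solution r []) c 0 = 1
          then acc2 ++ [(r, c)] else acc2) acc) [] =
        (PySem.List.pyRange 0 (board.length : Int) 1).flatMap (fun r =>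
          ((PySem.List.pyRange 0 (board.length : Int) 1).filter
            (fun c => decide (PySem.List.pyGetD (PySem.List.pyGetD solution r []) c 0 = 1))).map
          (fun c => (r, c))) := by
      simp only [PySem.List.foldl_append_ite]
      rw [PySem.List.foldl_append_eq_flatMap]
      simp
    rw [hps, checks_eq]
    simp only [List.map_flatMap, List.map_map]
    rfl
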